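-- pv_equiv track=rewrite | github.com/posl/comment_recommendation | script/split_gen/1_time/en/220_C/8.py | solve
-- ===== SOURCE A (Python) =====
-- def solve(N, A, X):
--     if sum(A) >= X:
--         return 0
--     B = A * 100
--     k = 0
--     s = 0
--     while s < X:
--         s += B[k]
--         k += 1
--     return k
-- ===== SOURCE B (Python) =====
-- def solve(N, A, X):
--     S = sum(A)
--     if S >= X or X <= 0:
--         return 0
--     P, s = [], 0
--     for a in A:
--         s += a
--         P.append(s)
--     Pmax = max(P) if P else 0
--     n = len(A)
--     s = 0
--     k = 0
--     for _ in range(100):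
--         if s + Pmax >= X:
--             for p in P:
--                 k += 1
--                 if s + p >= X:
--                     return k
--         s += S
--         k += n
--     raise ValueError("X not reached within 100 cycles")
-- ===== Notes on version B (the rewrite author's own statement) =====
-- stated objective: alternative
-- what changed: Instead of walking the concatenated list A*100 element by element, B precomputes the cycle sum and the per-cycle prefix sums once, skips whole cycles whose maximal prefix sum cannot reach X, and scans inside a single cycle only when the crossing must occur there.
import Mathlib
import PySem

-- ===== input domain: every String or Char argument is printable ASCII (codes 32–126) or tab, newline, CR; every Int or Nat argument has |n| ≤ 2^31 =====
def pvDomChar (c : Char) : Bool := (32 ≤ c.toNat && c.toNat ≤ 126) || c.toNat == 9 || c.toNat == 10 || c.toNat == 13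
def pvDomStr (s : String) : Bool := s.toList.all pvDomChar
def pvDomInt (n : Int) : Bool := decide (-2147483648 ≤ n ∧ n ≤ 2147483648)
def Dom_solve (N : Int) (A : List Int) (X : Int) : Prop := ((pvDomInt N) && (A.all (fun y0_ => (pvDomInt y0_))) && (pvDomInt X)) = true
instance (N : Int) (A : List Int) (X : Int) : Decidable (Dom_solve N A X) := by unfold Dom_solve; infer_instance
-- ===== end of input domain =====

-- B skips whole cycles using the cycle sum and the cycle's maximal prefix sum instead of
-- walking A*100 element by element (objective: alternative algorithm, same proved values).

-- ===== PORT A =====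
-- the while loop of A: walks B element by element; [] with s < X is Python's IndexError
-- (excluded by Pre_solve), the port returns 0 there.
def solveLoopA (X : Int) : List Int → Int → Int → Int
  | [], s, k => if s < X then 0 else k
  | b :: bs, s, k => if s < X then solveLoopA X bs (s + b) (k + 1) else k

def solve (N : Int) (A : List Int) (X : Int) : Int :=
  if A.sum ≥ X then 0
  else solveLoopA X (List.replicate 100 A).flatten 0 0

-- ===== PORT B =====
-- running prefix sums of A (the list P built by Source B's first loop)
def prefixSumsB : List Int → Int → List Int
  | [], _ => []
  | a :: as, s => (s + a) :: prefixSumsB as (s + a)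

-- Source B's inner scan: k += 1; if s + p >= X: return k
def scanB (X s : Int) : List Int → Int → Option Int
  | [], _ => none
  | p :: ps, k => if s + p ≥ X then some (k + 1) else scanB X s ps (k + 1)

-- Source B's loop over the 100 cycles; fuel 0 is the ValueError (excluded by Pre_solve), 0 there.
def cyclesB (X S Pmax n : Int) (P : List Int) : Nat → Int → Int → Int
  | 0, _, _ => 0
  | t + 1, s, k =>
    if s + Pmax ≥ X then
      match scanB X s P k with
      | some r => r
      | none => cyclesB X S Pmax n P t (s + S) (k + n)
    else cyclesB X S Pmax n P t (s + S) (k + n)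

def solve_alt (N : Int) (A : List Int) (X : Int) : Int :=
  let S := A.sum
  if S ≥ X ∨ X ≤ 0 then 0
  else
    let P := prefixSumsB A 0
    let Pmax := match P.max? with | some m => m | none => 0
    cyclesB X S Pmax (A.length : Int) P 100 0 0

-- ===== PRECONDITION & SPEC =====
-- Pre_solve excludes exactly the inputs where Python A raises IndexError (the while loop
-- runs past the end of A*100 because no prefix of the 100 cycles reaches X).
def Pre_solve (N : Int) (A : List Int) (X : Int) : Prop :=
  X ≤ A.sum ∨ X ≤ 0 ∨ ∃ i < 100 * A.length, X ≤ (((List.replicate 100 A).flatten.take (i + 1)).sum)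
instance (N : Int) (A : List Int) (X : Int) : Decidable (Pre_solve N A X) := by unfold Pre_solve; infer_instance

def pvWitness_solve : Int × List Int × Int := (3, [1, 2, 3], 2)

def Spec_solve (N : Int) (A : List Int) (X : Int) (out : Int) : Prop := out = solve_alt N A X
instance (N : Int) (A : List Int) (X : Int) (out : Int) : Decidable (Spec_solve N A X out) := by unfold Spec_solve; infer_instance

-- ===== CLAIM (what is proved, stated in full; the proofs are below) =====
def Claim_equal_solve : Prop := ∀ (N : Int) (A : List Int) (X : Int), Dom_solve N A X → Pre_solve N A X → Spec_solve N A X (solve N A X)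

-- ===== LEMMAS AND PROOFS =====

-- when the start state already satisfies s ≥ X, A's loop returns k immediately
theorem solveLoopA_done (X : Int) (l : List Int) (s k : Int) (h : ¬ s < X) :
    solveLoopA X l s k = k := by
  cases l <;> simp [solveLoopA, h]

-- the full sum is a member (A nonempty)
theorem sum_mem_prefixSumsB : ∀ (A : List Int) (c : Int), A ≠ [] → c + A.sum ∈ prefixSumsB A c := by
  intro A
  induction A with
  | nil => intro c h; simp at h
  | cons a as ih =>
    intro c _
    cases as with
    | nil => simp [prefixSumsB]
    | cons b bs =>
      rw [prefixSumsB]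
      apply List.mem_cons_of_mem
      have h2 := ih (c + a) (by simp)
      have e : c + (a :: b :: bs).sum = (c + a) + (b :: bs).sum := by simp; ring
      rw [e]; exact h2

-- a scan that returns none saw only states below X
theorem scanB_none {X s : Int} {l : List Int} {k : Int} (h : scanB X s l k = none) :
    ∀ p ∈ l, s + p < X := by
  induction l generalizing k with
  | nil => simp
  | cons p ps ih =>
    intro q hq
    simp only [scanB] at h
    by_cases hp : s + p ≥ X
    · simp [hp] at h
    · rw [if_neg hp] at h
      rcases List.mem_cons.mp hq with rfl | hq'
      · omega
      · exact ih h q hq'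

-- all states below X force the scan to return none
theorem scanB_eq_none {X s : Int} {l : List Int} (h : ∀ p ∈ l, s + p < X) (k : Int) :
    scanB X s l k = none := by
  induction l generalizing k with
  | nil => rfl
  | cons p ps ih =>
    have hp := h p (by simp)
    simp only [scanB, if_neg (by omega : ¬ s + p ≥ X)]
    exact ih (fun q hq => h q (List.mem_cons_of_mem _ hq)) (k + 1)

-- KEY: one cycle of A's loop equals one consultation of the scan
theorem loopA_cycle (X : Int) (A : List Int) :
    ∀ (rest : List Int) (c s0 k : Int), s0 + c < X →
    solveLoopA X (A ++ rest) (s0 + c) k =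
      match scanB X s0 (prefixSumsB A c) k with
      | some r => r
      | none => solveLoopA X rest (s0 + c + A.sum) (k + A.length) := by
  induction A with
  | nil => intro rest c s0 k h; simp [prefixSumsB, scanB]
  | cons a as ih =>
    intro rest c s0 k h
    simp only [List.cons_append, solveLoopA, if_pos h, prefixSumsB, scanB]
    by_cases hx : s0 + (c + a) ≥ X
    · have : ¬ s0 + c + a < X := by omega
      simp [if_pos hx, solveLoopA_done X _ _ _ this]
    · have h' : s0 + (c + a) < X := by omega
      have := ih rest (c + a) s0 (k + 1) h'
      simp only [if_neg hx]
      have e1 : s0 + c + a = s0 + (c + a) := by ring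
      rw [e1, this]
      have e2 : s0 + (c + a) + as.sum = s0 + c + (a :: as).sum := by simp; ring
      have e3 : k + 1 + (as.length : Int) = k + ((a :: as).length : Int) := by
        simp; ring
      cases hs : scanB X s0 (prefixSumsB as (c + a)) (k + 1) <;> simp [e2, e3]

-- KEY: A's loop over t concatenated cycles equals B's cycle loop with fuel t
theorem loopA_cycles (X S Pmax : Int) (A : List Int)
    (hS : S = A.sum) (hP : Pmax = match (prefixSumsB A 0).max? with | some m => m | none => 0) :
    ∀ (t : Nat) (s0 k : Int), s0 < X →
    solveLoopA X (List.replicate t A).flatten s0 k =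
      cyclesB X S Pmax (A.length : Int) (prefixSumsB A 0) t s0 k := by
  subst hS
  intro t
  induction t with
  | zero => intro s0 k h; simp [cyclesB, solveLoopA, h]
  | succ t ih =>
    intro s0 k h
    have hflat : (List.replicate (t + 1) A).flatten = A ++ (List.replicate t A).flatten := by
      simp [List.replicate_succ]
    have hmain := loopA_cycle X A ((List.replicate t A).flatten) 0 s0 k (by omega)
    simp only [add_zero] at hmain
    rw [hflat, hmain]
    have hmaxmem : ∀ p ∈ prefixSumsB A 0, p ≤ Pmax := by
      intro p hp
      cases hm : (prefixSumsB A 0).max? with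
      | none => exact absurd hp (by simp [List.max?_eq_none_iff.mp hm])
      | some m =>
        rw [hm] at hP
        simp only at hP
        have h2 := (List.max?_eq_some_iff.mp hm).2 p hp
        omega
    have hnext : scanB X s0 (prefixSumsB A 0) k = none → (s0 + A.sum < X ∨ A = []) := by
      intro hnone
      by_cases hA : A = []
      · exact Or.inr hA
      · left
        have hmem := sum_mem_prefixSumsB A 0 hA
        have := scanB_none hnone _ hmem
        omega
    simp only [cyclesB]
    by_cases hpm : s0 + Pmax ≥ X
    · rw [if_pos hpm]
      cases hs : scanB X s0 (prefixSumsB A 0) k with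
      | some r => rfl
      | none =>
        rcases hnext hs with hlt | hnil
        · exact ih (s0 + A.sum) (k + A.length) hlt
        · subst hnil
          simpa using ih s0 k h
    · rw [if_neg hpm]
      have hsnone : scanB X s0 (prefixSumsB A 0) k = none :=
        scanB_eq_none (fun p hp => by have := hmaxmem p hp; omega) k
      rw [hsnone]
      rcases hnext hsnone with hlt | hnil
      · exact ih (s0 + A.sum) (k + A.length) hlt
      · subst hnil
        simpa using ih s0 k h
-- ===== VERDICT (by name: the statement is the Claim_ definition above) =====
theorem solve_spec : Claim_equal_solve := by
  intro N A X _ _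
  unfold Spec_solve solve solve_alt
  by_cases h1 : A.sum ≥ X
  · simp [h1]
  · rw [if_neg h1]
    by_cases h2 : X ≤ 0
    · rw [solveLoopA_done X _ _ _ (by omega), if_pos (Or.inr h2)]
    · rw [if_neg (by tauto)]
      exact loopA_cycles X A.sum _ A rfl rfl 100 0 0 (by omega)
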